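-- pv_equiv track=rewrite | github.com/JavierNLopez/peliculas-django | mymovies/clean_bios.py | clean_biography
-- ===== SOURCE A (Python) =====
-- def clean_biography(biography):
--     if not biography:
--         return None
--
--     cut_phrases = [
--         "Description above from the Wikipedia article",
--         "licensed under CC-BY-SA",
--         "Full list of contributors on Wikipedia",
--         "full list of contributors on Wikipedia",
--     ]
--
--     cleaned = biography
--     for phrase in cut_phrases:
--         if phrase in cleaned:
--             cleaned = cleaned.split(phrase)[0].strip()
--
--     return cleaned.strip() if cleaned else None
-- ===== SOURCE B (Python) =====
-- def clean_biography(biography):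
--     if not biography:
--         return None
--
--     cut_phrases = [
--         "Description above from the Wikipedia article",
--         "licensed under CC-BY-SA",
--         "Full list of contributors on Wikipedia",
--         "full list of contributors on Wikipedia",
--     ]
--
--     # single pass: earliest index at which any attribution phrase starts
--     cut = len(biography)
--     for phrase in cut_phrases:
--         i = biography.find(phrase)
--         if i != -1 and i < cut:
--             cut = i
--
--     cleaned = biography[:cut].strip()
--     return cleaned or None
-- ===== Notes on version B (the rewrite author's own statement) =====
-- stated objective: simpler
-- what changed: B computes once the minimum index at which any attribution phrase first occurs and truncates+strips the biography a single time, instead of A's progressive cut-and-restrip loop that re-searches and re-strips the shrinking string at every phrase.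
-- intended difference: On non-empty biographies consisting only of whitespace (no phrase can occur there), A returns the empty string '' because it tests truthiness before stripping, while B returns None; None is the intended value since A's own last line shows empty results are meant to become None. — e.g. on clean_biography(some " "): A returns some "", B returns none
import Mathlib
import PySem

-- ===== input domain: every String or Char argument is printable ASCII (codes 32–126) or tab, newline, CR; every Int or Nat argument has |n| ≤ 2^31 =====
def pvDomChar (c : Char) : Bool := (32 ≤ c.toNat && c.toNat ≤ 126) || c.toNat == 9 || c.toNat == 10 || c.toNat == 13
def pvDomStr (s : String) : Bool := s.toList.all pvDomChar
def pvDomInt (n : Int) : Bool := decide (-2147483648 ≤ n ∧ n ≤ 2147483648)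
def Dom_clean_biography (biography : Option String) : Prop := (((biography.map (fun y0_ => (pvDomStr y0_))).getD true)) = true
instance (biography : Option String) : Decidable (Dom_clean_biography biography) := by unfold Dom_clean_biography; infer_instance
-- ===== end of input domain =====

-- B computes the earliest index at which any attribution phrase occurs and cuts once, instead of
-- A's progressive cut-and-restrip loop; objective: simpler.

-- ===== PORT A =====
def pvPhrases : List String :=
  ["Description above from the Wikipedia article",
   "licensed under CC-BY-SA",
   "Full list of contributors on Wikipedia",
   "full list of contributors on Wikipedia"]

-- literal transliteration of Source A: `cleaned.split(phrase)[0]` is the head of splitOn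
-- (split with a nonempty separator never returns [], so headD is exact for `[0]`)
def clean_biography (biography : Option String) : Option String :=
  match biography with
  | none => none
  | some s =>
    if s = "" then none
    else
      let cleaned := pvPhrases.foldl (fun c p =>
        if PySem.Str.isIn p c then
          PySem.Str.strip (String.ofList ((PySem.Chars.splitOn c.toList p.toList).headD []))
        else c) s
      if cleaned = "" then none else some (PySem.Str.strip cleaned)

-- ===== PORT B =====
-- transliteration of Source B: one pass computing the minimal find index, then a single cut + strip
def clean_biography_alt (biography : Option String) : Option String :=
  match biography with
  | none => none
  | some s =>
    if s = "" then none
    else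
      let cut := pvPhrases.foldl (fun cut p =>
        let i := PySem.Str.find s p
        if i ≠ -1 ∧ i < cut then i else cut) (PySem.Str.len s)
      let cleaned := PySem.Str.strip (PySem.Str.slice s none (some cut))
      if cleaned = "" then none else some cleaned

-- ===== PRECONDITION & SPEC =====
-- On non-empty all-whitespace biographies (no phrase can occur there) A returns '' because it
-- tests truthiness before stripping, while B returns None; None is the intended value since A's
-- own last line shows empty results are meant to become None.
def D_clean_biography (biography : Option String) : Prop :=
  biography.getD "" ≠ "" ∧ PySem.Str.strip (biography.getD "") = ""
instance (biography : Option String) : Decidable (D_clean_biography biography) := by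
  unfold D_clean_biography; infer_instance

def Spec_clean_biography (biography : Option String) (out : Option String) : Prop :=
  ¬ D_clean_biography biography → out = clean_biography_alt biography
instance (biography : Option String) (out : Option String) : Decidable (Spec_clean_biography biography out) := by
  unfold Spec_clean_biography; infer_instance

def pvDiffWitness_clean_biography : Option String := some " "
def pvDiffWitnessOut_clean_biography : (Option String) × (Option String) := (some "", none)

-- ===== CLAIM (what is proved, stated in full; the proofs are below) =====
def Claim_unchanged_clean_biography : Prop := ∀ (biography : Option String), Dom_clean_biography biography → Spec_clean_biography biography (clean_biography biography)
def Claim_changed_clean_biography : Prop := Dom_clean_biography (pvDiffWitness_clean_biography) ∧ D_clean_biography (pvDiffWitness_clean_biography) ∧ clean_biography (pvDiffWitness_clean_biography) = pvDiffWitnessOut_clean_biography.1 ∧ clean_biography_alt (pvDiffWitness_clean_biography) = pvDiffWitnessOut_clean_biography.2 ∧ pvDiffWitnessOut_clean_biography.1 ≠ pvDiffWitnessOut_clean_biography.2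
def Claim_exact_clean_biography : Prop := ∀ (biography : Option String), Dom_clean_biography biography → D_clean_biography biography → clean_biography biography ≠ clean_biography_alt biography

-- ===== LEMMAS AND PROOFS =====

-- phrase shape: nonempty, non-whitespace first and last character
abbrev GoodP (p : List Char) : Prop :=
  p ≠ [] ∧ (∀ h ∈ p.head?, PySem.Chars.isspace h = false) ∧
    (∀ g ∈ p.getLast?, PySem.Chars.isspace g = false)

-- no proper suffix of q overlaps a prefix of p (in either truncation direction)
abbrev NoOvl (p q : List Char) : Prop :=
  ∀ d ∈ List.range q.length, 0 < d → ¬(p <+: q.drop d) ∧ ¬(q.drop d <+: p)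

-- Bool-level counterparts of GoodP / NoOvl, so the concrete phrase facts evaluate by `decide`
def goodB (p : List Char) : Bool :=
  !p.isEmpty && (p.head?.all fun a => !PySem.Chars.isspace a)
    && (p.getLast?.all fun g => !PySem.Chars.isspace g)

def noOvlB (p q : List Char) : Bool :=
  (List.range q.length).all fun d =>
    (d == 0) || !(p.isPrefixOf (q.drop d) || (q.drop d).isPrefixOf p)

lemma goodB_spec {p : List Char} (h : goodB p = true) : GoodP p := by
  unfold goodB at h
  simp only [Bool.and_eq_true] at h
  refine ⟨?_, ?_, ?_⟩
  · intro hn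
    rw [hn] at h
    simp at h
  · intro a ha
    have h2 := h.1.2
    rw [Option.mem_def.mp ha] at h2
    simpa using h2
  · intro g hg
    have h2 := h.2
    rw [Option.mem_def.mp hg] at h2
    simpa using h2

lemma noOvlB_spec {p q : List Char} (h : noOvlB p q = true) : NoOvl p q := by
  intro d hd hd0
  have h1 := List.all_eq_true.mp h d hd
  have h2 : (d == 0) = false := by
    simp
    omega
  rw [h2, Bool.false_or, Bool.not_eq_true', Bool.or_eq_false_iff] at h1
  constructor
  · intro hc
    rw [← List.isPrefixOf_iff_prefix, h1.1] at hc
    cases hc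
  · intro hc
    rw [← List.isPrefixOf_iff_prefix, h1.2] at hc
    cases hc

lemma pvFactsBool :
    (pvPhrases.all fun p => goodB p.toList
      && pvPhrases.all fun q => noOvlB p.toList q.toList) = true := by
  decide

lemma pvFacts : ∀ p ∈ pvPhrases, GoodP p.toList ∧ ∀ q ∈ pvPhrases, NoOvl p.toList q.toList := by
  intro p hp
  have h := List.all_eq_true.mp pvFactsBool p hp
  rw [Bool.and_eq_true] at h
  exact ⟨goodB_spec h.1, fun q hq => noOvlB_spec (List.all_eq_true.mp h.2 q hq)⟩

lemma good_len {p : List Char} (hp : GoodP p) : 1 ≤ p.length := by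
  have h := hp.1
  cases p with
  | nil => exact absurd rfl h
  | cons a t => simp

-- the per-phrase step of A, expressed on List Char (split(p)[0] = take of the first find)
def stepA' (c p : List Char) : List Char :=
  if PySem.Chars.isIn p c then PySem.Chars.strip (c.take (PySem.Chars.find c p).toNat) else c

-- the running-minimum fold of B, expressed on Nat
def minF (c : List Char) (ps : List (List Char)) (m : Nat) : Nat :=
  ps.foldl (fun m p =>
    if PySem.Chars.isIn p c && decide ((PySem.Chars.find c p).toNat < m)
    then (PySem.Chars.find c p).toNat else m) m

lemma minF_cons (c p : List Char) (ps : List (List Char)) (m : Nat) :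
    minF c (p :: ps) m = minF c ps
      (if PySem.Chars.isIn p c && decide ((PySem.Chars.find c p).toNat < m)
       then (PySem.Chars.find c p).toNat else m) := rfl

-- ---------- generic strip structure ----------

lemma dropWhile_eq_drop (p : Char → Bool) (l : List Char) :
    l.dropWhile p = l.drop (l.takeWhile p).length := by
  induction l with
  | nil => simp
  | cons a t ih => by_cases h : p a <;> simp [List.takeWhile_cons, h, ih]

lemma lstrip_eq_drop (c : List Char) :
    PySem.Chars.lstrip c = c.drop (c.takeWhile PySem.Chars.isspace).length := by
  simp [PySem.Chars.lstrip, dropWhile_eq_drop]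

lemma rstrip_eq_take (c : List Char) :
    PySem.Chars.rstrip c =
      c.take (c.length - (c.reverse.takeWhile PySem.Chars.isspace).length) := by
  simp [PySem.Chars.rstrip, dropWhile_eq_drop, List.drop_reverse]

lemma mem_drop_rstrip_ws (c : List Char) :
    ∀ x ∈ c.drop (c.length - (c.reverse.takeWhile PySem.Chars.isspace).length),
      PySem.Chars.isspace x = true := by
  intro x hx
  have h2 : c.reverse.takeWhile PySem.Chars.isspace
      = c.reverse.take (c.reverse.takeWhile PySem.Chars.isspace).length :=
    List.prefix_iff_eq_take.mp (c.reverse.takeWhile_prefix (p := PySem.Chars.isspace))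
  have hK : (c.reverse.takeWhile PySem.Chars.isspace).length ≤ c.length := by
    have := (c.reverse.takeWhile_prefix (p := PySem.Chars.isspace)).length_le
    simpa using this
  have h1 : c.drop (c.length - (c.reverse.takeWhile PySem.Chars.isspace).length)
      = (c.reverse.takeWhile PySem.Chars.isspace).reverse := by
    apply List.reverse_injective
    rw [List.reverse_drop, List.reverse_reverse]
    rw [show c.length - (c.length - (c.reverse.takeWhile PySem.Chars.isspace).length)
        = (c.reverse.takeWhile PySem.Chars.isspace).length from by omega]
    exact h2.symm
  rw [h1] at hx
  exact List.mem_takeWhile_imp (List.mem_reverse.mp hx)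

lemma head?_lstrip_not_ws (c : List Char) :
    ∀ h ∈ (PySem.Chars.lstrip c).head?, PySem.Chars.isspace h = false := by
  intro h hh
  unfold PySem.Chars.lstrip at hh
  induction c with
  | nil => simp at hh
  | cons a t ih =>
    by_cases ha : PySem.Chars.isspace a
    · rw [List.dropWhile_cons_of_pos ha] at hh; exact ih hh
    · rw [List.dropWhile_cons_of_neg ha] at hh
      simp at hh
      subst hh
      simpa using ha

lemma lstrip_idem (c : List Char) :
    PySem.Chars.lstrip (PySem.Chars.lstrip c) = PySem.Chars.lstrip c := by
  simp [PySem.Chars.lstrip, List.dropWhile_idempotent]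

lemma rstrip_idem (c : List Char) :
    PySem.Chars.rstrip (PySem.Chars.rstrip c) = PySem.Chars.rstrip c := by
  simp [PySem.Chars.rstrip, List.dropWhile_idempotent]

lemma takeWhile_lstrip_nil (c : List Char) :
    (PySem.Chars.lstrip c).takeWhile PySem.Chars.isspace = [] := by
  rcases h : PySem.Chars.lstrip c with _ | ⟨a, t⟩
  · simp
  · have : PySem.Chars.isspace a = false := by
      have := head?_lstrip_not_ws c a; rw [h] at this; exact this (by simp)
    simp [List.takeWhile_cons, this]

lemma strip_idem (c : List Char) :
    PySem.Chars.strip (PySem.Chars.strip c) = PySem.Chars.strip c := by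
  show PySem.Chars.rstrip (PySem.Chars.lstrip (PySem.Chars.rstrip (PySem.Chars.lstrip c)))
      = PySem.Chars.rstrip (PySem.Chars.lstrip c)
  have h1 : PySem.Chars.lstrip (PySem.Chars.rstrip (PySem.Chars.lstrip c))
      = PySem.Chars.rstrip (PySem.Chars.lstrip c) := by
    rw [lstrip_eq_drop]
    have h2 : (PySem.Chars.rstrip (PySem.Chars.lstrip c)).takeWhile PySem.Chars.isspace = [] := by
      rw [rstrip_eq_take, ← List.take_takeWhile, takeWhile_lstrip_nil, List.take_nil]
    rw [h2]; simp
  rw [h1, rstrip_idem]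

lemma strip_eq_nil_all_ws {c : List Char} (h : PySem.Chars.strip c = []) :
    ∀ x ∈ c, PySem.Chars.isspace x = true := by
  have h1 : PySem.Chars.lstrip c = [] := by
    have h2 : (PySem.Chars.lstrip c).reverse.dropWhile PySem.Chars.isspace = [] := by
      have h3 := h
      unfold PySem.Chars.strip PySem.Chars.rstrip at h3
      simpa using h3
    have h3 : ∀ x ∈ (PySem.Chars.lstrip c).reverse, PySem.Chars.isspace x = true :=
      List.dropWhile_eq_nil_iff.mp h2
    rcases h4 : PySem.Chars.lstrip c with _ | ⟨a, t⟩
    · rfl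
    · exfalso
      have ha : PySem.Chars.isspace a = false := by
        have := head?_lstrip_not_ws c a; rw [h4] at this; exact this (by simp)
      have hb : PySem.Chars.isspace a = true := by
        apply h3; rw [h4]; simp
      simp [ha] at hb
  intro x hx
  exact List.dropWhile_eq_nil_iff.mp (show c.dropWhile PySem.Chars.isspace = [] from h1) x hx

-- ---------- occurrence position bounds ----------

lemma prefix_head? {q y : List Char} (h : q <+: y) (hq : q ≠ []) : y.head? = q.head? := by
  obtain ⟨t, rfl⟩ := h
  cases q with
  | nil => exact absurd rfl hq
  | cons a s => simp

lemma occ_ge_leadWs {q c : List Char} {j : Nat} (h : q <+: c.drop j) (hq : GoodP q) :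
    (c.takeWhile PySem.Chars.isspace).length ≤ j := by
  obtain ⟨hne, hhd, -⟩ := hq
  by_contra hlt
  push_neg at hlt
  cases hq' : q with
  | nil => exact hne hq'
  | cons a t =>
    subst hq'
    have hws : PySem.Chars.isspace a = false := hhd a (by simp)
    have h1 : (c.drop j).head? = some a := by
      rw [prefix_head? h (by simp)]
      simp
    have hsplit : c.drop j = ((c.takeWhile PySem.Chars.isspace).drop j)
        ++ c.drop (c.takeWhile PySem.Chars.isspace).length := by
      conv_lhs => rw [← List.takeWhile_append_dropWhile (p := PySem.Chars.isspace) (l := c)]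
      rw [List.drop_append_of_le_length (by omega), dropWhile_eq_drop]
    rcases hx : (c.takeWhile PySem.Chars.isspace).drop j with _ | ⟨b, u⟩
    · have hlx := congrArg List.length hx
      simp at hlx
      omega
    · rw [hsplit, hx] at h1
      simp at h1
      have hbmem : b ∈ c.takeWhile PySem.Chars.isspace := by
        have hbm : b ∈ (c.takeWhile PySem.Chars.isspace).drop j := by rw [hx]; simp
        exact List.drop_subset _ _ hbm
      have hbws := List.mem_takeWhile_imp hbmem
      rw [h1] at hbws
      simp [hws] at hbws

lemma head?_take_pos {α : Type} (l : List α) {k : Nat} (hk : 0 < k) :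
    (l.take k).head? = l.head? := by
  cases l with
  | nil => simp
  | cons a t =>
    cases k with
    | zero => omega
    | succ k => simp

lemma getLast?_drop_of_lt {α : Type} {l : List α} {d : Nat} (h : d < l.length) :
    (l.drop d).getLast? = l.getLast? := by
  rw [List.getLast?_eq_head?_reverse, List.getLast?_eq_head?_reverse, List.reverse_drop]
  exact head?_take_pos _ (by omega)

lemma occ_end_le_rstrip {q c : List Char} {j : Nat} (h : q <+: c.drop j) (hq : GoodP q) :
    j + q.length ≤ c.length - (c.reverse.takeWhile PySem.Chars.isspace).length := by
  obtain ⟨hne, -, hlast⟩ := hq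
  by_contra hlt
  push_neg at hlt
  obtain ⟨g, hg⟩ : ∃ g, q.getLast? = some g := by
    cases hq2 : q.getLast? with
    | some g => exact ⟨_, rfl⟩
    | none => exact absurd (List.getLast?_eq_none_iff.mp hq2) hne
  have hwg : PySem.Chars.isspace g = false := hlast g hg
  have hgmem : g ∈ c.drop (c.length - (c.reverse.takeWhile PySem.Chars.isspace).length) := by
    by_cases hRj : c.length - (c.reverse.takeWhile PySem.Chars.isspace).length ≤ j
    · have h1 : g ∈ q := List.mem_of_getLast? hg
      have h2 : g ∈ c.drop j := h.subset h1
      have h3 : c.drop j = (c.drop (c.length - (c.reverse.takeWhile PySem.Chars.isspace).length)).drop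
          (j - (c.length - (c.reverse.takeWhile PySem.Chars.isspace).length)) := by
        rw [List.drop_drop]; congr 1; omega
      rw [h3] at h2
      exact List.drop_subset _ _ h2
    · push_neg at hRj
      have hd2 : c.length - (c.reverse.takeWhile PySem.Chars.isspace).length - j < q.length := by omega
      obtain ⟨t, ht⟩ := h
      have h1 : c.drop (c.length - (c.reverse.takeWhile PySem.Chars.isspace).length)
          = q.drop (c.length - (c.reverse.takeWhile PySem.Chars.isspace).length - j) ++ t := by
        have h5 : c.drop (c.length - (c.reverse.takeWhile PySem.Chars.isspace).length)
            = (c.drop j).drop (c.length - (c.reverse.takeWhile PySem.Chars.isspace).length - j) := by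
          rw [List.drop_drop]; congr 1; omega
        rw [h5, ← ht, List.drop_append_of_le_length (by omega)]
      have h2 : g ∈ q.drop (c.length - (c.reverse.takeWhile PySem.Chars.isspace).length - j) := by
        apply List.mem_of_getLast?
        rw [getLast?_drop_of_lt hd2]; exact hg
      rw [h1]
      exact List.mem_append_left _ h2
  have := mem_drop_rstrip_ws c g hgmem
  simp [hwg] at this

lemma overlap_kill {p q c : List Char} {i j : Nat} (hq : q <+: c.drop j) (hp : p <+: c.drop i)
    (hji : j < i) (hno : NoOvl p q) : j + q.length ≤ i := by
  by_contra hlt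
  push_neg at hlt
  have hd0 : 0 < i - j := by omega
  have hdq : i - j < q.length := by omega
  obtain ⟨t, ht⟩ := hq
  have h1 : c.drop i = q.drop (i - j) ++ t := by
    have h2 : c.drop i = (c.drop j).drop (i - j) := by
      rw [List.drop_drop]; congr 1; omega
    rw [h2, ← ht, List.drop_append_of_le_length (by omega)]
  have h2 : q.drop (i - j) <+: c.drop i := ⟨t, h1.symm⟩
  have hno' := hno (i - j) (List.mem_range.mpr hdq) hd0
  rcases List.prefix_or_prefix_of_prefix hp h2 with h3 | h3
  · exact hno'.1 h3
  · exact hno'.2 h3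

-- ---------- find characterisation ----------

lemma find_first {c q : List Char} {n : Nat} (h1 : q <+: c.drop n)
    (h2 : ∀ i < n, ¬ q <+: c.drop i) : PySem.Chars.find c q = n := by
  have hocc : q <:+: c := h1.isInfix.trans (List.drop_suffix n c).isInfix
  have h0 : 0 ≤ PySem.Chars.find c q := (PySem.Chars.find_nonneg_iff c q).mpr hocc
  obtain ⟨ha, hb⟩ := PySem.Chars.find_spec h0
  rcases lt_trichotomy (PySem.Chars.find c q).toNat n with hlt | heq | hgt
  · exact absurd ha (h2 _ hlt)
  · omega
  · exact absurd h1 (hb _ hgt)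

lemma occ_of_isIn {q c : List Char} (h : PySem.Chars.isIn q c = true) :
    q <+: c.drop (PySem.Chars.find c q).toNat ∧
      ∀ i < (PySem.Chars.find c q).toNat, ¬ q <+: c.drop i := by
  have hocc : q <:+: c := (PySem.Chars.isIn_iff_infix q c).mp h
  exact PySem.Chars.find_spec ((PySem.Chars.find_nonneg_iff c q).mpr hocc)

lemma fst_add_len_le {q c : List Char} (h : PySem.Chars.isIn q c = true) (hq : q ≠ []) :
    (PySem.Chars.find c q).toNat + q.length ≤ c.length := by
  have h1 := (occ_of_isIn h).1
  have h2 : q.length ≤ (c.drop (PySem.Chars.find c q).toNat).length := h1.length_le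
  have h3 : PySem.Chars.find c q ≤ (c.length : Int) := PySem.Chars.find_le_length c q
  rw [List.length_drop] at h2
  omega

-- ---------- the cut-transfer lemmas ----------
-- Throughout: the evolved state is strip (c.take i), i the first occurrence of a Good phrase p.

lemma strip_take_eq {p c : List Char} {i : Nat} (hp : GoodP p) (hpi : p <+: c.drop i) :
    PySem.Chars.strip (c.take i) =
      PySem.Chars.rstrip ((c.take i).drop (c.takeWhile PySem.Chars.isspace).length) := by
  have hLi : (c.takeWhile PySem.Chars.isspace).length ≤ i := occ_ge_leadWs hpi hp
  show PySem.Chars.rstrip (PySem.Chars.lstrip (c.take i)) = _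
  have hlen : (List.takeWhile PySem.Chars.isspace (c.take i)).length
      = (c.takeWhile PySem.Chars.isspace).length := by
    rw [← List.take_takeWhile, List.length_take]
    omega
  rw [lstrip_eq_drop, hlen]

lemma prefix_drop_z {q c : List Char} {i j : Nat}
    (hqj : q <+: c.drop j) (hend : j + q.length ≤ i)
    {L : Nat} (hLj : L ≤ j) :
    q <+: ((c.take i).drop L).drop (j - L) := by
  rw [List.drop_drop, show L + (j - L) = j from by omega, List.drop_take]
  rw [List.prefix_take_iff]
  exact ⟨hqj, by omega⟩

lemma prefix_undrop_z {q c : List Char} {i j' L : Nat}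
    (h : q <+: ((c.take i).drop L).drop j') : q <+: c.drop (L + j') := by
  rw [List.drop_drop, List.drop_take] at h
  exact (List.prefix_take_iff.mp h).1

lemma TLa {p q c : List Char} {i : Nat} (hp : GoodP p) (hq : GoodP q) (hno : NoOvl p q)
    (hpi : p <+: c.drop i)
    (hqocc : PySem.Chars.isIn q c = true)
    (hji : (PySem.Chars.find c q).toNat < i) :
    PySem.Chars.isIn q (PySem.Chars.strip (c.take i)) = true ∧
      PySem.Chars.find (PySem.Chars.strip (c.take i)) q
        = (((PySem.Chars.find c q).toNat - (c.takeWhile PySem.Chars.isspace).length : Nat) : Int) := by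
  obtain ⟨hqj, hjmin⟩ := occ_of_isIn hqocc
  have hqne : q ≠ [] := hq.1
  have hLj : (c.takeWhile PySem.Chars.isspace).length ≤ (PySem.Chars.find c q).toNat :=
    occ_ge_leadWs hqj hq
  have hend : (PySem.Chars.find c q).toNat + q.length ≤ i := overlap_kill hqj hpi hji hno
  rw [strip_take_eq hp hpi]
  have hz1 : q <+: ((c.take i).drop (c.takeWhile PySem.Chars.isspace).length).drop
      ((PySem.Chars.find c q).toNat - (c.takeWhile PySem.Chars.isspace).length) :=
    prefix_drop_z hqj hend hLj
  have hz2 := occ_end_le_rstrip hz1 hq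
  have hc'1 : q <+: (PySem.Chars.rstrip ((c.take i).drop (c.takeWhile PySem.Chars.isspace).length)).drop
      ((PySem.Chars.find c q).toNat - (c.takeWhile PySem.Chars.isspace).length) := by
    rw [rstrip_eq_take, List.drop_take, List.prefix_take_iff]
    exact ⟨hz1, by omega⟩
  have hc'min : ∀ j' < (PySem.Chars.find c q).toNat - (c.takeWhile PySem.Chars.isspace).length,
      ¬ q <+: (PySem.Chars.rstrip ((c.take i).drop (c.takeWhile PySem.Chars.isspace).length)).drop j' := by
    intro j' hj' hcon
    rw [rstrip_eq_take, List.drop_take] at hcon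
    have h1 : q <+: ((c.take i).drop (c.takeWhile PySem.Chars.isspace).length).drop j' :=
      (List.prefix_take_iff.mp hcon).1
    have h2 : q <+: c.drop ((c.takeWhile PySem.Chars.isspace).length + j') := prefix_undrop_z h1
    exact hjmin ((c.takeWhile PySem.Chars.isspace).length + j') (by omega) h2
  constructor
  · rw [← PySem.Chars.exists_prefix_drop_iff_isIn]
    exact ⟨_, hc'1⟩
  · exact find_first hc'1 hc'min

lemma TLb {p q c : List Char} {i : Nat} (hp : GoodP p) (hq : GoodP q)
    (hpi : p <+: c.drop i) (hi : i ≤ c.length)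
    (hnocc : ¬ (PySem.Chars.isIn q c = true ∧ (PySem.Chars.find c q).toNat < i)) :
    PySem.Chars.isIn q (PySem.Chars.strip (c.take i)) = false := by
  by_contra hcon
  rw [Bool.not_eq_false] at hcon
  rw [strip_take_eq hp hpi] at hcon
  obtain ⟨j', hj'⟩ := (PySem.Chars.exists_prefix_drop_iff_isIn q _).mpr hcon
  have hq1 : 1 ≤ q.length := good_len hq
  have hlen1 : j' + q.length ≤ (PySem.Chars.rstrip ((c.take i).drop (c.takeWhile PySem.Chars.isspace).length)).length := by
    have := hj'.length_le
    rw [List.length_drop] at this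
    omega
  have hlenz : (PySem.Chars.rstrip ((c.take i).drop (c.takeWhile PySem.Chars.isspace).length)).length
      ≤ ((c.take i).drop (c.takeWhile PySem.Chars.isspace).length).length := by
    rw [rstrip_eq_take]; simp
  have hzlen : ((c.take i).drop (c.takeWhile PySem.Chars.isspace).length).length
      ≤ i - (c.takeWhile PySem.Chars.isspace).length := by
    rw [List.length_drop, List.length_take]; omega
  have h1 : q <+: ((c.take i).drop (c.takeWhile PySem.Chars.isspace).length).drop j' := by
    rw [rstrip_eq_take, List.drop_take] at hj'
    exact (List.prefix_take_iff.mp hj').1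
  have h2 : q <+: c.drop ((c.takeWhile PySem.Chars.isspace).length + j') := prefix_undrop_z h1
  have hocc : PySem.Chars.isIn q c = true := by
    rw [← PySem.Chars.exists_prefix_drop_iff_isIn]
    exact ⟨_, h2⟩
  have hfind := (occ_of_isIn hocc).2
  have hle : (PySem.Chars.find c q).toNat ≤ (c.takeWhile PySem.Chars.isspace).length + j' := by
    by_contra hgt
    push_neg at hgt
    exact hfind _ hgt h2
  exact hnocc ⟨hocc, by omega⟩

-- ---------- the strip-of-strip-of-take collapse ----------

lemma strip_take_strip {p q c : List Char} {i m : Nat} (hp : GoodP p) (hq : GoodP q)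
    (hpi : p <+: c.drop i) (hqm : q <+: c.drop m) (hend : m + q.length ≤ i) :
    PySem.Chars.strip ((PySem.Chars.strip (c.take i)).take
        (m - (c.takeWhile PySem.Chars.isspace).length))
      = PySem.Chars.strip (c.take m) := by
  have hqne : q ≠ [] := hq.1
  have hLm : (c.takeWhile PySem.Chars.isspace).length ≤ m := occ_ge_leadWs hqm hq
  have hq1 : 1 ≤ q.length := good_len hq
  have hmi : m < i := by omega
  rw [strip_take_eq hp hpi]
  have hz1 : q <+: ((c.take i).drop (c.takeWhile PySem.Chars.isspace).length).drop
      (m - (c.takeWhile PySem.Chars.isspace).length) := prefix_drop_z hqm hend hLm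
  have hz2 := occ_end_le_rstrip hz1 hq
  have h1 : (PySem.Chars.rstrip ((c.take i).drop (c.takeWhile PySem.Chars.isspace).length)).take
      (m - (c.takeWhile PySem.Chars.isspace).length) = (c.take m).drop (c.takeWhile PySem.Chars.isspace).length := by
    rw [rstrip_eq_take, List.take_take, min_eq_left (by omega), List.take_drop,
      show (c.takeWhile PySem.Chars.isspace).length + (m - (c.takeWhile PySem.Chars.isspace).length) = m from by omega,
      List.take_take, min_eq_left (le_of_lt hmi)]
  rw [h1]
  have h2 : PySem.Chars.lstrip (c.take m) = (c.take m).drop (c.takeWhile PySem.Chars.isspace).length := by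
    have hlen : (List.takeWhile PySem.Chars.isspace (c.take m)).length
        = (c.takeWhile PySem.Chars.isspace).length := by
      rw [← List.take_takeWhile, List.length_take]
      omega
    rw [lstrip_eq_drop, hlen]
  show PySem.Chars.rstrip (PySem.Chars.lstrip ((c.take m).drop (c.takeWhile PySem.Chars.isspace).length))
      = PySem.Chars.rstrip (PySem.Chars.lstrip (c.take m))
  rw [← h2, lstrip_idem]

-- ---------- minF bookkeeping ----------

lemma minF_le (c : List Char) (ps : List (List Char)) (m : Nat) : minF c ps m ≤ m := by
  induction ps generalizing m with
  | nil => simp [minF]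
  | cons p ps ih =>
    rw [minF_cons]
    refine le_trans (ih _) ?_
    split
    · next h =>
      simp only [Bool.and_eq_true, decide_eq_true_eq] at h
      omega
    · exact Nat.le.refl

lemma minF_le_find {c : List Char} {ps : List (List Char)} {m : Nat} {q : List Char}
    (hq : q ∈ ps) (hocc : PySem.Chars.isIn q c = true) :
    minF c ps m ≤ (PySem.Chars.find c q).toNat := by
  induction ps generalizing m with
  | nil => simp at hq
  | cons p ps ih =>
    rcases List.mem_cons.mp hq with rfl | hq'
    · rw [minF_cons]
      refine le_trans (minF_le _ _ _) ?_
      by_cases hlt : (PySem.Chars.find c q).toNat < m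
      · rw [if_pos (by simp [hocc, hlt])]
      · rw [if_neg (by simp [hocc, hlt])]; omega
    · rw [minF_cons]
      exact ih hq'

lemma minF_cases (c : List Char) (ps : List (List Char)) (m : Nat) :
    minF c ps m = m ∨ ∃ q ∈ ps, PySem.Chars.isIn q c = true ∧
      minF c ps m = (PySem.Chars.find c q).toNat := by
  induction ps generalizing m with
  | nil => left; simp [minF]
  | cons p ps ih =>
    rw [minF_cons]
    by_cases h : (PySem.Chars.isIn p c && decide ((PySem.Chars.find c p).toNat < m)) = true
    · rw [if_pos h]
      rcases ih ((PySem.Chars.find c p).toNat) with h1 | ⟨q, hq, hocc, h1⟩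
      · right
        refine ⟨p, by simp, ?_, h1⟩
        simp only [Bool.and_eq_true] at h
        exact h.1
      · right; exact ⟨q, by simp [hq], hocc, h1⟩
    · rw [if_neg h]
      rcases ih m with h1 | ⟨q, hq, hocc, h1⟩
      · left; exact h1
      · right; exact ⟨q, by simp [hq], hocc, h1⟩

lemma minF_stable {c : List Char} {ps : List (List Char)} {m : Nat}
    (h : ∀ q ∈ ps, PySem.Chars.isIn q c = true → m ≤ (PySem.Chars.find c q).toNat) :
    minF c ps m = m := by
  induction ps with
  | nil => simp [minF]
  | cons p ps ih =>
    rw [minF_cons]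
    have h1 : (if PySem.Chars.isIn p c && decide ((PySem.Chars.find c p).toNat < m)
        then (PySem.Chars.find c p).toNat else m) = m := by
      split
      · next hcond =>
        simp only [Bool.and_eq_true, decide_eq_true_eq] at hcond
        have := h p (by simp) hcond.1
        omega
      · rfl
    rw [h1]
    exact ih fun q hq => h q (by simp [hq])

-- ---------- the main fold collapse ----------

lemma main_fold (ps : List (List Char)) (hG : ∀ p ∈ ps, GoodP p)
    (hO : ∀ p ∈ ps, ∀ q ∈ ps, NoOvl p q) :
    ∀ c, ps.foldl stepA' c =
      if minF c ps c.length = c.length then c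
      else PySem.Chars.strip (c.take (minF c ps c.length)) := by
  induction ps with
  | nil => intro c; simp [minF]
  | cons p ps ih =>
    intro c
    have hGp : GoodP p := hG p (by simp)
    have hG' : ∀ q ∈ ps, GoodP q := fun q hq => hG q (by simp [hq])
    have hO' : ∀ p' ∈ ps, ∀ q ∈ ps, NoOvl p' q := fun p' hp' q hq => hO p' (by simp [hp']) q (by simp [hq])
    by_cases hpc : PySem.Chars.isIn p c = true
    · -- p occurs: cut at its first occurrence, then recurse on the stripped prefix
      obtain ⟨hpi, hpmin⟩ := occ_of_isIn hpc
      have hp1 : 1 ≤ p.length := good_len hGp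
      have hilen := fst_add_len_le hpc hGp.1
      have hstep : stepA' c p = PySem.Chars.strip (c.take (PySem.Chars.find c p).toNat) := by
        simp [stepA', hpc]
      have hcond : (PySem.Chars.isIn p c && decide ((PySem.Chars.find c p).toNat < c.length)) = true := by
        simp only [hpc, Bool.true_and, decide_eq_true_eq]
        omega
      rw [List.foldl_cons, hstep, minF_cons, if_pos hcond]
      rcases Nat.eq_or_lt_of_le (minF_le c ps (PySem.Chars.find c p).toNat) with hmi | hmlt
      · -- no later phrase occurs strictly earlier: the fold stops at strip (take i)
        have hnone : ∀ q ∈ ps,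
            PySem.Chars.isIn q (PySem.Chars.strip (c.take (PySem.Chars.find c p).toNat)) = false := by
          intro q hq
          refine TLb hGp (hG' q hq) hpi (by omega) ?_
          rintro ⟨hocc, hlt⟩
          have := minF_le_find (m := (PySem.Chars.find c p).toNat) hq hocc
          omega
        rw [ih hG' hO']
        rw [minF_stable (fun q hq hocc => absurd hocc (by simp [hnone q hq]))]
        rw [if_pos rfl, hmi, if_neg (by omega)]
      · -- some later phrase occurs earlier: both sides cut at the global minimum
        have hex : ∃ q ∈ ps, PySem.Chars.isIn q c = true ∧
            minF c ps (PySem.Chars.find c p).toNat = (PySem.Chars.find c q).toNat := by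
          rcases minF_cases c ps (PySem.Chars.find c p).toNat with h1 | h2
          · omega
          · exact h2
        obtain ⟨q₁, hq₁, hq₁occ, hm1⟩ := hex
        obtain ⟨hq₁j, -⟩ := occ_of_isIn hq₁occ
        have hq₁G : GoodP q₁ := hG' q₁ hq₁
        have hq₁len : 1 ≤ q₁.length := good_len hq₁G
        have hLm : (c.takeWhile PySem.Chars.isspace).length ≤ (PySem.Chars.find c q₁).toNat :=
          occ_ge_leadWs hq₁j hq₁G
        have hend1 : (PySem.Chars.find c q₁).toNat + q₁.length ≤ (PySem.Chars.find c p).toNat :=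
          overlap_kill hq₁j hpi (by omega) (hO p (by simp) q₁ (by simp [hq₁]))
        have hTq₁ := TLa hGp hq₁G (hO p (by simp) q₁ (by simp [hq₁])) hpi hq₁occ (by omega)
        have hq₁toNat : (PySem.Chars.find (PySem.Chars.strip (c.take (PySem.Chars.find c p).toNat)) q₁).toNat
            = (PySem.Chars.find c q₁).toNat - (c.takeWhile PySem.Chars.isspace).length := by
          rw [hTq₁.2]
          exact Int.toNat_natCast _
        have hmLlen : (PySem.Chars.find c q₁).toNat - (c.takeWhile PySem.Chars.isspace).length
            < (PySem.Chars.strip (c.take (PySem.Chars.find c p).toNat)).length := by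
          obtain ⟨h1, -⟩ := occ_of_isIn hTq₁.1
          have h2 := h1.length_le
          rw [List.length_drop, hq₁toNat] at h2
          omega
        have hminc' : minF (PySem.Chars.strip (c.take (PySem.Chars.find c p).toNat)) ps
            (PySem.Chars.strip (c.take (PySem.Chars.find c p).toNat)).length
            = (PySem.Chars.find c q₁).toNat - (c.takeWhile PySem.Chars.isspace).length := by
          have hub := minF_le_find (m := (PySem.Chars.strip (c.take (PySem.Chars.find c p).toNat)).length)
            hq₁ hTq₁.1
          rw [hq₁toNat] at hub
          rcases minF_cases (PySem.Chars.strip (c.take (PySem.Chars.find c p).toNat)) ps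
              (PySem.Chars.strip (c.take (PySem.Chars.find c p).toNat)).length with h1 | ⟨q, hq, hocc', h1⟩
          · omega
          · have hoccc : PySem.Chars.isIn q c = true ∧ (PySem.Chars.find c q).toNat < (PySem.Chars.find c p).toNat := by
              by_contra hcon
              have := TLb hGp (hG' q hq) hpi (by omega) hcon
              rw [this] at hocc'
              cases hocc'
            have hT := TLa hGp (hG' q hq) (hO p (by simp) q (by simp [hq])) hpi hoccc.1 hoccc.2
            have hge : minF c ps (PySem.Chars.find c p).toNat ≤ (PySem.Chars.find c q).toNat :=
              minF_le_find hq hoccc.1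
            rw [h1, hT.2, Int.toNat_natCast]
            have hLq : (c.takeWhile PySem.Chars.isspace).length ≤ (PySem.Chars.find c q).toNat :=
              occ_ge_leadWs (occ_of_isIn hoccc.1).1 (hG' q hq)
            omega
        rw [ih hG' hO', hminc', if_neg (by omega), hm1, if_neg (by omega)]
        exact strip_take_strip hGp hq₁G hpi hq₁j (by omega)
    · -- p does not occur: the step is the identity
      have hpc' : PySem.Chars.isIn p c = false := by
        simpa using hpc
      have hstep : stepA' c p = c := by
        simp [stepA', hpc']
      have hfold1 : (if PySem.Chars.isIn p c && decide ((PySem.Chars.find c p).toNat < c.length)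
          then (PySem.Chars.find c p).toNat else c.length) = c.length := by
        rw [if_neg (by simp [hpc'])]
      rw [List.foldl_cons, hstep, minF_cons, hfold1]
      exact ih hG' hO' c

-- ---------- splitOn head = take of first occurrence ----------

def firstIdx (sep : List Char) : List Char → Nat
  | [] => 0
  | l@(_ :: t) => if sep.isPrefixOf l then 0 else firstIdx sep t + 1

lemma go_zero (sep l cur : List Char) (acc : List (List Char)) :
    PySem.Chars.splitOn.go sep 0 l cur acc = ((cur.reverse ++ l) :: acc).reverse := by
  cases l <;> rfl

lemma go_nil (sep cur : List Char) (acc : List (List Char)) (fuel : Nat) :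
    PySem.Chars.splitOn.go sep (fuel+1) [] cur acc = (cur.reverse :: acc).reverse := rfl

lemma go_cons (sep : List Char) (fuel : Nat) (a : Char) (t cur : List Char) (acc : List (List Char)) :
    PySem.Chars.splitOn.go sep (fuel+1) (a :: t) cur acc =
      if sep.isPrefixOf (a :: t)
      then PySem.Chars.splitOn.go sep fuel ((a :: t).drop sep.length) [] (cur.reverse :: acc)
      else PySem.Chars.splitOn.go sep fuel t (a :: cur) acc := rfl

lemma go_acc (sep : List Char) : ∀ (fuel : Nat) (l cur : List Char) (acc : List (List Char)),
    PySem.Chars.splitOn.go sep fuel l cur acc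
      = acc.reverse ++ PySem.Chars.splitOn.go sep fuel l cur [] := by
  intro fuel
  induction fuel with
  | zero => intro l cur acc; rw [go_zero, go_zero]; simp
  | succ fuel ih =>
    intro l cur acc
    cases l with
    | nil => rw [go_nil, go_nil]; simp
    | cons a t =>
      rw [go_cons, go_cons]
      by_cases h : sep.isPrefixOf (a :: t)
      · rw [if_pos h, if_pos h]
        rw [ih _ _ (cur.reverse :: acc), ih _ _ [cur.reverse]]
        simp
      · rw [if_neg h, if_neg h]
        exact ih t (a :: cur) acc

lemma go_head (sep : List Char) : ∀ (fuel : Nat) (l cur : List Char), l.length < fuel →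
    (PySem.Chars.splitOn.go sep fuel l cur []).headD []
      = cur.reverse ++ l.take (firstIdx sep l) := by
  intro fuel
  induction fuel with
  | zero => intro l cur h; omega
  | succ fuel ih =>
    intro l cur h
    cases l with
    | nil => rw [go_nil]; simp [firstIdx]
    | cons a t =>
      rw [go_cons]
      by_cases hpre : sep.isPrefixOf (a :: t)
      · rw [if_pos hpre, go_acc]
        simp [firstIdx, hpre]
      · rw [if_neg hpre]
        rw [ih t (a :: cur) (by simpa using Nat.lt_of_succ_lt_succ h)]
        simp [firstIdx, hpre, List.take_succ_cons]

lemma firstIdx_prefix {sep l : List Char} (hsep : sep ≠ []) (hocc : sep <:+: l) :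
    sep <+: l.drop (firstIdx sep l) := by
  induction l with
  | nil =>
    exact absurd (List.eq_nil_of_infix_nil hocc) hsep
  | cons a t ih =>
    by_cases h : sep.isPrefixOf (a :: t)
    · simpa [firstIdx, h] using List.isPrefixOf_iff_prefix.mp h
    · have hocc' : sep <:+: t := by
        rcases (List.infix_cons_iff).mp hocc with h1 | h1
        · exact absurd (List.isPrefixOf_iff_prefix.mpr h1) (by simp [h])
        · exact h1
      simpa [firstIdx, h] using ih hocc'

lemma firstIdx_min {sep l : List Char} : ∀ i < firstIdx sep l, ¬ sep <+: l.drop i := by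
  induction l with
  | nil => simp [firstIdx]
  | cons a t ih =>
    intro i hi
    by_cases h : sep.isPrefixOf (a :: t)
    · simp [firstIdx, h] at hi
    · simp [firstIdx, h] at hi
      cases i with
      | zero =>
        intro hcon
        exact h (List.isPrefixOf_iff_prefix.mpr (by simpa using hcon))
      | succ i =>
        simpa using ih i (by omega)

lemma splitOn_headD {sep l : List Char} (hsep : sep ≠ []) (hocc : sep <:+: l) :
    (PySem.Chars.splitOn l sep).headD [] = l.take (PySem.Chars.find l sep).toNat := by
  have h1 : (PySem.Chars.splitOn l sep).headD [] = l.take (firstIdx sep l) := by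
    show (PySem.Chars.splitOn.go sep (l.length + 1) l [] []).headD [] = _
    rw [go_head sep (l.length + 1) l [] (by omega)]
    simp
  have h2 : PySem.Chars.find l sep = firstIdx sep l :=
    find_first (firstIdx_prefix hsep hocc) firstIdx_min
  rw [h1, h2, Int.toNat_natCast]

-- ---------- bridging A's String-level fold to stepA' ----------

lemma foldA_toList (ps : List String) (hne : ∀ p ∈ ps, p.toList ≠ []) :
    ∀ c : String,
      (ps.foldl (fun c p =>
        if PySem.Str.isIn p c then
          PySem.Str.strip (String.ofList ((PySem.Chars.splitOn c.toList p.toList).headD []))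
        else c) c).toList
      = (ps.map String.toList).foldl stepA' c.toList := by
  induction ps with
  | nil => intro c; simp
  | cons p ps ih =>
    intro c
    have hpne : p.toList ≠ [] := hne p (by simp)
    have hne' : ∀ q ∈ ps, q.toList ≠ [] := fun q hq => hne q (by simp [hq])
    rw [List.foldl_cons, List.map_cons, List.foldl_cons, ih hne']
    congr 1
    by_cases hin : PySem.Str.isIn p c
    · have hin' : PySem.Chars.isIn p.toList c.toList = true := by
        rwa [PySem.Str.isIn_eq] at hin
      have hocc : p.toList <:+: c.toList := (PySem.Chars.isIn_iff_infix _ _).mp hin'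
      rw [if_pos hin]
      show (PySem.Str.strip _).toList = stepA' c.toList p.toList
      rw [PySem.Str.toList_strip, String.toList_ofList, splitOn_headD hpne hocc]
      simp [stepA', hin']
    · have hin' : PySem.Chars.isIn p.toList c.toList = false := by
        rw [PySem.Str.isIn_eq] at hin; simpa using hin
      rw [if_neg hin]
      simp [stepA', hin']

-- ---------- bridging B's Int fold to minF ----------

lemma foldB_toInt (s : String) (ps : List String) : ∀ m : Nat,
    (ps.foldl (fun cut p =>
        if PySem.Str.find s p ≠ -1 ∧ PySem.Str.find s p < cut then PySem.Str.find s p else cut) ((m : Nat) : Int))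
      = ((minF s.toList (ps.map String.toList) m : Nat) : Int) := by
  induction ps with
  | nil => intro m; simp [minF]
  | cons p ps ih =>
    intro m
    rw [List.foldl_cons, List.map_cons, minF_cons]
    have hstep : (if PySem.Str.find s p ≠ -1 ∧ PySem.Str.find s p < ((m : Nat) : Int) then PySem.Str.find s p
          else ((m : Nat) : Int))
        = (((if PySem.Chars.isIn p.toList s.toList
              && decide ((PySem.Chars.find s.toList p.toList).toNat < m)
            then (PySem.Chars.find s.toList p.toList).toNat else m) : Nat) : Int) := by
      rw [PySem.Str.find_eq]
      by_cases hocc : PySem.Chars.isIn p.toList s.toList = true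
      · have h0 : 0 ≤ PySem.Chars.find s.toList p.toList :=
          (PySem.Chars.find_nonneg_iff _ _).mpr ((PySem.Chars.isIn_iff_infix _ _).mp hocc)
        by_cases hlt : (PySem.Chars.find s.toList p.toList).toNat < m
        · rw [if_pos ⟨by omega, by omega⟩, if_pos (by simp [hocc, hlt])]
          omega
        · rw [if_neg (by omega), if_neg (by simp [hocc, hlt])]
      · have h1 : PySem.Chars.find s.toList p.toList = -1 := by
          rw [PySem.Chars.find_eq_neg_one_iff]
          intro hcon
          rw [(PySem.Chars.isIn_iff_infix _ _).mpr hcon] at hocc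
          exact hocc rfl
        rw [if_neg (by rw [h1]; simp), if_neg (by simp [hocc])]
    rw [hstep, ih]

-- a fold in which no phrase occurs keeps the string untouched on A's side
lemma foldA_id {c : List Char} {ps : List (List Char)}
    (h : ∀ p ∈ ps, PySem.Chars.isIn p c = false) : ps.foldl stepA' c = c := by
  induction ps with
  | nil => rfl
  | cons p ps ih =>
    rw [List.foldl_cons]
    have h1 : stepA' c p = c := by simp [stepA', h p (by simp)]
    rw [h1]
    exact ih fun q hq => h q (by simp [hq])

lemma all_ws_no_occ {s : String} (hstrip : PySem.Str.strip s = "") :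
    ∀ p ∈ pvPhrases, PySem.Chars.isIn p.toList s.toList = false := by
  intro p hp
  have hallws : ∀ x ∈ s.toList, PySem.Chars.isspace x = true := by
    apply strip_eq_nil_all_ws
    have := congrArg String.toList hstrip
    rwa [PySem.Str.toList_strip] at this
  have hG : GoodP p.toList := (pvFacts p hp).1
  by_contra hcon
  rw [Bool.not_eq_false] at hcon
  obtain ⟨hne, hhd, -⟩ := hG
  cases hq : p.toList with
  | nil => exact hne hq
  | cons a t =>
    have hmem : a ∈ s.toList := by
      have hinf : p.toList <:+: s.toList := (PySem.Chars.isIn_iff_infix _ _).mp hcon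
      exact hinf.subset (by rw [hq]; simp)
    have h1 := hallws a hmem
    have h2 := hhd a (by rw [hq]; simp)
    simp [h2] at h1

-- ---------- unfolding the ports at `some s`, s ≠ "" ----------

lemma cbA_some (s : String) (hs : s ≠ "") :
    clean_biography (some s)
      = (if (pvPhrases.foldl (fun c p =>
          if PySem.Str.isIn p c then
            PySem.Str.strip (String.ofList ((PySem.Chars.splitOn c.toList p.toList).headD []))
          else c) s) = "" then none
        else some (PySem.Str.strip (pvPhrases.foldl (fun c p =>
          if PySem.Str.isIn p c then
            PySem.Str.strip (String.ofList ((PySem.Chars.splitOn c.toList p.toList).headD []))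
          else c) s))) := by
  simp only [clean_biography]
  rw [if_neg hs]

lemma cbB_some (s : String) (hs : s ≠ "") :
    clean_biography_alt (some s)
      = (if PySem.Str.strip (PySem.Str.slice s none (some (pvPhrases.foldl (fun cut p =>
            if PySem.Str.find s p ≠ -1 ∧ PySem.Str.find s p < cut then PySem.Str.find s p else cut)
            (PySem.Str.len s)))) = "" then none
        else some (PySem.Str.strip (PySem.Str.slice s none (some (pvPhrases.foldl (fun cut p =>
            if PySem.Str.find s p ≠ -1 ∧ PySem.Str.find s p < cut then PySem.Str.find s p else cut)
            (PySem.Str.len s)))))) := by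
  simp only [clean_biography_alt]
  rw [if_neg hs]

-- ---------- final assembly ----------

set_option maxHeartbeats 1000000 in
lemma main_eq (s : String) (hs : s ≠ "") (hD : ¬ (s ≠ "" ∧ PySem.Str.strip s = "")) :
    clean_biography (some s) = clean_biography_alt (some s) := by
  have hstrip : PySem.Str.strip s ≠ "" := fun h => hD ⟨hs, h⟩
  have hG : ∀ p ∈ pvPhrases.map String.toList, GoodP p := by
    intro p hp
    obtain ⟨q, hq, rfl⟩ := List.mem_map.mp hp
    exact (pvFacts q hq).1
  have hO : ∀ p ∈ pvPhrases.map String.toList, ∀ q ∈ pvPhrases.map String.toList, NoOvl p q := by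
    intro p hp q hq
    obtain ⟨p', hp', rfl⟩ := List.mem_map.mp hp
    obtain ⟨q', hq', rfl⟩ := List.mem_map.mp hq
    exact (pvFacts p' hp').2 q' hq'
  have hne : ∀ p ∈ pvPhrases, p.toList ≠ [] := fun p hp => ((pvFacts p hp).1).1
  rw [cbA_some s hs, cbB_some s hs]
  have hlen : PySem.Str.len s = ((s.toList.length : Nat) : Int) := PySem.Str.len_eq s
  rw [hlen, foldB_toInt s pvPhrases s.toList.length]
  set M := minF s.toList (pvPhrases.map String.toList) s.toList.length with hM
  set F := pvPhrases.foldl (fun c p =>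
      if PySem.Str.isIn p c then
        PySem.Str.strip (String.ofList ((PySem.Chars.splitOn c.toList p.toList).headD []))
      else c) s with hF
  have hfoldA : F.toList = if M = s.toList.length then s.toList
      else PySem.Chars.strip (s.toList.take M) := by
    rw [hF, hM, foldA_toList pvPhrases hne s, main_fold _ hG hO s.toList]
  have hB2 : (PySem.Str.strip (PySem.Str.slice s none (some ((M : Nat) : Int)))).toList
      = PySem.Chars.strip (s.toList.take M) := by
    rw [PySem.Str.toList_strip, PySem.Str.toList_slice, PySem.Chars.slice_eq_listSlice,
      PySem.List.slice_to _ (by positivity)]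
    simp
  by_cases hm : M = s.toList.length
  · -- no phrase occurs: A returns strip s, B cuts nothing
    have hA1 : F = s := String.toList_inj.mp (by rw [hfoldA, if_pos hm])
    have hB1 : PySem.Str.strip (PySem.Str.slice s none (some ((M : Nat) : Int)))
        = PySem.Str.strip s := String.toList_inj.mp
      (by rw [hB2, hm, List.take_length, PySem.Str.toList_strip])
    rw [hA1, hB1, if_neg hs, if_neg hstrip]
  · -- the fold cuts at the global minimum; both sides strip once
    by_cases hnil : PySem.Chars.strip (s.toList.take M) = []
    · have hA1 : F = "" := String.toList_eq_nil_iff.mp (by rw [hfoldA, if_neg hm, hnil])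
      have hB1 : PySem.Str.strip (PySem.Str.slice s none (some ((M : Nat) : Int))) = "" :=
        String.toList_eq_nil_iff.mp (by rw [hB2, hnil])
      rw [if_pos hA1, if_pos hB1]
    · have hA1 : F ≠ "" := by
        intro h
        apply hnil
        have h2 := congrArg String.toList h
        rw [hfoldA, if_neg hm] at h2
        simpa using h2
      have hB1 : PySem.Str.strip (PySem.Str.slice s none (some ((M : Nat) : Int))) ≠ "" := by
        intro h
        apply hnil
        have h2 := congrArg String.toList h
        rw [hB2] at h2
        simpa using h2
      rw [if_neg hA1, if_neg hB1]
      simp only [Option.some.injEq]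
      apply String.toList_inj.mp
      rw [PySem.Str.toList_strip, hfoldA, if_neg hm, strip_idem, ← hB2]

-- ===== VERDICT =====

theorem clean_biography_spec : Claim_unchanged_clean_biography := by
  intro biography _ hD
  cases biography with
  | none => rfl
  | some s =>
    by_cases hs : s = ""
    · subst hs; rfl
    · apply main_eq s hs
      intro hcon
      exact hD (by simpa [D_clean_biography] using hcon)

theorem clean_biography_changed : Claim_changed_clean_biography := by
  unfold Claim_changed_clean_biography; decide

theorem clean_biography_tight : Claim_exact_clean_biography := by
  intro biography _ hD
  obtain ⟨hne, hstrip⟩ := hD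
  cases biography with
  | none => simp at hne
  | some s =>
    simp only [Option.getD_some] at hne hstrip
    have hnocc := all_ws_no_occ hstrip
    have hA : clean_biography (some s) = some (PySem.Str.strip s) := by
      rw [cbA_some s hne]
      have hA1 : (pvPhrases.foldl (fun c p =>
          if PySem.Str.isIn p c then
            PySem.Str.strip (String.ofList ((PySem.Chars.splitOn c.toList p.toList).headD []))
          else c) s) = s := by
        apply String.toList_inj.mp
        rw [foldA_toList pvPhrases (fun p hp => ((pvFacts p hp).1).1) s]
        exact foldA_id (by
          intro p hp
          obtain ⟨q, hq, rfl⟩ := List.mem_map.mp hp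
          exact hnocc q hq)
      rw [hA1, if_neg hne]
    have hB : clean_biography_alt (some s) = none := by
      rw [cbB_some s hne]
      rw [show PySem.Str.len s = ((s.toList.length : Nat) : Int) from PySem.Str.len_eq s,
        foldB_toInt s pvPhrases s.toList.length]
      rw [minF_stable (by
        intro q hq hocc
        obtain ⟨q', hq', rfl⟩ := List.mem_map.mp hq
        rw [hnocc q' hq'] at hocc
        cases hocc)]
      rw [if_pos]
      apply String.toList_eq_nil_iff.mp
      rw [PySem.Str.toList_strip, PySem.Str.toList_slice, PySem.Chars.slice_eq_listSlice,
        PySem.List.slice_to _ (by positivity)]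
      simp only [Int.toNat_natCast, List.take_length]
      have := congrArg String.toList hstrip
      rwa [PySem.Str.toList_strip] at this
    rw [hA, hB]
    simp
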